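-- pv_equiv track=rewrite | github.com/em0-omg/dna_storage_system | GoldmanMethod.py | r_rotate
-- ===== SOURCE A (Python) =====
-- def r_rotate(text, pre_N):
--
--     ans = ''
--
--     for ch in text:
--         if pre_N == "A":
--             if ch == "C":
--                 ans = ans + '0'
--                 pre_N = "C"
--             elif ch == "G":
--                 ans = ans + '1'
--                 pre_N = "G"
--             elif ch == "T":
--                 ans = ans + '2'
--                 pre_N = "T"
--             else:
--                 ans = ans + 'X'
--                 pre_N = "A"
--         elif pre_N == "C":
--             if ch == "G":
--                 ans = ans + '0'
--                 pre_N = "G"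
--             elif ch == "T":
--                 ans = ans + '1'
--                 pre_N = "T"
--             elif ch == "A":
--                 ans = ans + '2'
--                 pre_N = "A"
--             else:
--                 ans = ans + 'X'
--                 pre_N = "A"
--         elif pre_N == "G":
--             if ch == "T":
--                 ans = ans + '0'
--                 pre_N = "T"
--             elif ch == "A":
--                 ans = ans + '1'
--                 pre_N = "A"
--             elif ch == "C":
--                 ans = ans + '2'
--                 pre_N = "C"
--             else:
--                 ans = ans + 'X'
--                 pre_N = "A"
--         elif pre_N == "T":
--             if ch == "A":
--                 ans = ans + '0'
--                 pre_N = "A"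
--             elif ch == "C":
--                 ans = ans + '1'
--                 pre_N = "C"
--             elif ch == "G":
--                 ans = ans + '2'
--                 pre_N = "G"
--             else:
--                 ans = ans + 'X'
--                 pre_N = "A"
--
--     return ans
-- ===== SOURCE B (Python) =====
-- def r_rotate(text, pre_N):
--     # Two staged passes instead of A's single-pass 16-branch state machine:
--     # pass 1 scans out the sequence of machine states; pass 2 maps each
--     # (state, char) pair independently to its output symbol via the cyclic
--     # "wheel" of the three bases following the state in ACGT order.
--     order = "ACGT"
--     if pre_N not in ("A", "C", "G", "T"):
--         # a non-base state never changes, and A's loop appends nothing from it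
--         return ''
--     # pass 1: states[k] is the machine state seen just before text[k]
--     states = [pre_N]
--     for ch in text:
--         s = states[-1]
--         states.append(ch if ch in order and ch != s else "A")
--     # pass 2: each pair is mapped independently, no state threaded here
--     def sym(s, c):
--         wheel = (order * 2)[order.index(s) + 1:][:3]  # bases after s, cyclically
--         return str(wheel.index(c)) if c in wheel else 'X'
--     return ''.join(sym(s, c) for s, c in zip(states, text))
-- ===== Notes on version B (the rewrite author's own statement) =====
-- stated objective: faster
-- what changed: Replaces A's single-pass 16-branch state machine with two staged passes: a scan that materialises the sequence of machine states first, then an independent per-(state,char) mapping via a cyclic wheel slice of 'ACGT', collected and joined at the end (no quadratic repeated string concatenation); a non-base initial state returns '' immediately since A's loop can never append from it.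
import Mathlib
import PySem

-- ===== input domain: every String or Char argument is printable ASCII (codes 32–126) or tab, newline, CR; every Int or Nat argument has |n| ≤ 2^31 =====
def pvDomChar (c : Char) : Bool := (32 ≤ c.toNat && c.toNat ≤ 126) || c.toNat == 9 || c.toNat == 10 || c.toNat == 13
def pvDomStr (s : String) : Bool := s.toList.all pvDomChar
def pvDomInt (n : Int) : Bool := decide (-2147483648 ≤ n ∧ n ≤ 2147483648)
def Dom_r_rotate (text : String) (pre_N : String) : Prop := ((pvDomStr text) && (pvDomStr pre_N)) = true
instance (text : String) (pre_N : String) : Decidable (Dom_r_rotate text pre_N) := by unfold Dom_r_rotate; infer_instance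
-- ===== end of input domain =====

-- B recomputes A's rotating decode in two staged passes (a scan of states, then an
-- independent per-pair mapping via a cyclic wheel) instead of A's single-pass
-- 16-branch state machine; objective: alternative decomposition, O(n) join vs
-- repeated concatenation.


-- ===== PORT A =====
-- one iteration of A's loop: state = (ans as List Char, pre_N as String)
def stepA (st : List Char × String) (ch : Char) : List Char × String :=
  let ans := st.1
  let pre := st.2
  if pre = "A" then
    if ch = 'C' then (ans ++ ['0'], "C")
    else if ch = 'G' then (ans ++ ['1'], "G")
    else if ch = 'T' then (ans ++ ['2'], "T")
    else (ans ++ ['X'], "A")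
  else if pre = "C" then
    if ch = 'G' then (ans ++ ['0'], "G")
    else if ch = 'T' then (ans ++ ['1'], "T")
    else if ch = 'A' then (ans ++ ['2'], "A")
    else (ans ++ ['X'], "A")
  else if pre = "G" then
    if ch = 'T' then (ans ++ ['0'], "T")
    else if ch = 'A' then (ans ++ ['1'], "A")
    else if ch = 'C' then (ans ++ ['2'], "C")
    else (ans ++ ['X'], "A")
  else if pre = "T" then
    if ch = 'A' then (ans ++ ['0'], "A")
    else if ch = 'C' then (ans ++ ['1'], "C")
    else if ch = 'G' then (ans ++ ['2'], "G")
    else (ans ++ ['X'], "A")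
  else (ans, pre)

def r_rotate (text : String) (pre_N : String) : String :=
  String.ofList (text.toList.foldl stepA ([], pre_N)).1

-- ===== PORT B =====
def bOrder : String := "ACGT"

-- pass-1 step: states.append(ch if ch in order and ch != s else "A"), s = states[-1]
-- (states is never empty, so the negative index is exactly the last element;
--  'ch in order' for the single character ch is character membership)
def bStep (states : List String) (ch : Char) : List String :=
  let s := states.getLastD ""
  states ++ [if ch ∈ bOrder.toList ∧ ¬(String.ofList [ch] = s) then String.ofList [ch] else "A"]

-- sym(s, c): wheel = (order*2)[order.index(s)+1:][:3]; s is always one of the four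
-- bases at every call, so order.index(s) = Chars.find ≥ 0 and the nonneg slice is drop/take
def symB (s : String) (c : Char) : String :=
  let i := (PySem.Chars.find bOrder.toList s.toList).toNat
  let wheel := ((bOrder.toList ++ bOrder.toList).drop (i + 1)).take 3
  if c ∈ wheel then PySem.Int.toStr ((wheel.idxOf c : Nat) : Int) else "X"

def r_rotate_alt (text : String) (pre_N : String) : String :=
  if pre_N = "A" ∨ pre_N = "C" ∨ pre_N = "G" ∨ pre_N = "T" then
    -- pass 1: states[k] is the machine state seen just before text[k]
    let states := text.toList.foldl bStep [pre_N]
    -- pass 2: map each (state, char) pair independently and join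
    PySem.Str.join "" ((states.zip text.toList).map (fun p => symB p.1 p.2))
  else ""

-- ===== PRECONDITION & SPEC =====
def Spec_r_rotate (text : String) (pre_N : String) (out : String) : Prop := out = r_rotate_alt text pre_N
instance (text : String) (pre_N : String) (out : String) : Decidable (Spec_r_rotate text pre_N out) := by unfold Spec_r_rotate; infer_instance

-- ===== CLAIM (what is proved, stated in full; the proofs are below) =====
def Claim_equal_r_rotate : Prop := ∀ (text : String) (pre_N : String), Dom_r_rotate text pre_N → Spec_r_rotate text pre_N (r_rotate text pre_N)

-- ===== LEMMAS AND PROOFS =====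

-- the value bStep appends, as a function of the previous state
def nextS (s : String) (ch : Char) : String :=
  if ch ∈ bOrder.toList ∧ ¬(String.ofList [ch] = s) then String.ofList [ch] else "A"

-- the tail of B's state scan, recursively
def tailStates (s : String) : List Char → List String
  | [] => []
  | c :: cs => nextS s c :: tailStates (nextS s c) cs

-- B's pair-mapped output, recursively (what zip + map compute)
def outB (s : String) : List Char → List String
  | [] => []
  | c :: cs => symB s c :: outB (nextS s c) cs

lemma foldl_bStep_scan (cs : List Char) : ∀ (init : List String), init ≠ [] →
    List.foldl bStep init cs = init ++ tailStates (init.getLastD "") cs := by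
  induction cs with
  | nil => intro init _; simp [tailStates]
  | cons c cs ih =>
    intro init hne
    have h1 : bStep init c = init ++ [nextS (init.getLastD "") c] := rfl
    rw [List.foldl_cons, h1, ih _ (by simp)]
    simp [tailStates]

lemma zip_map_symB (cs : List Char) : ∀ s : String,
    ((s :: tailStates s cs).zip cs).map (fun p => symB p.1 p.2) = outB s cs := by
  induction cs with
  | nil => intro s; simp [outB]
  | cons c cs ih =>
    intro s
    simp [tailStates, outB, List.zip_cons_cons, ih]

-- A's loop is a no-op when the state is not one of the four bases
lemma foldA_nonbase (chars : List Char) (ans : List Char) (pre : String)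
    (h : pre ≠ "A" ∧ pre ≠ "C" ∧ pre ≠ "G" ∧ pre ≠ "T") :
    List.foldl stepA (ans, pre) chars = (ans, pre) := by
  induction chars generalizing ans with
  | nil => rfl
  | cons c cs ih =>
    simp only [List.foldl_cons, stepA, h.1, h.2.1, h.2.2.1, h.2.2.2, if_false]
    exact ih ans

-- nextS always lands on a base
lemma nextS_base (s : String) (ch : Char) :
    nextS s ch = "A" ∨ nextS s ch = "C" ∨ nextS s ch = "G" ∨ nextS s ch = "T" := by
  unfold nextS
  split_ifs with h
  · rcases h with ⟨hm, -⟩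
    have hm' : ch = 'A' ∨ ch = 'C' ∨ ch = 'G' ∨ ch = 'T' := by simpa [bOrder] using hm
    rcases hm' with rfl | rfl | rfl | rfl <;> simp
  · simp

-- one A-step from a base state appends exactly symB and moves to nextS
set_option maxHeartbeats 1600000 in
lemma stepA_symB (ans : List Char) (pre : String) (c : Char)
    (hp : pre = "A" ∨ pre = "C" ∨ pre = "G" ∨ pre = "T") :
    stepA (ans, pre) c = (ans ++ (symB pre c).toList, nextS pre c) := by
  have hc : c = 'A' ∨ c = 'C' ∨ c = 'G' ∨ c = 'T' ∨ (c ≠ 'A' ∧ c ≠ 'C' ∧ c ≠ 'G' ∧ c ≠ 'T') := by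
    by_cases hA : c = 'A'; · exact Or.inl hA
    by_cases hC : c = 'C'; · exact Or.inr (Or.inl hC)
    by_cases hG : c = 'G'; · exact Or.inr (Or.inr (Or.inl hG))
    by_cases hT : c = 'T'; · exact Or.inr (Or.inr (Or.inr (Or.inl hT)))
    exact Or.inr (Or.inr (Or.inr (Or.inr ⟨hA, hC, hG, hT⟩)))
  have fA : PySem.Chars.find ['A','C','G','T'] ['A'] = 0 := by decide
  have fC : PySem.Chars.find ['A','C','G','T'] ['C'] = 1 := by decide
  have fG : PySem.Chars.find ['A','C','G','T'] ['G'] = 2 := by decide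
  have fT : PySem.Chars.find ['A','C','G','T'] ['T'] = 3 := by decide
  rcases hp with rfl | rfl | rfl | rfl <;>
    rcases hc with rfl | rfl | rfl | rfl | ⟨h1, h2, h3, h4⟩ <;>
      first
        | simp [stepA, symB, nextS, bOrder, fA, fC, fG, fT, h1, h2, h3, h4]
        | (simp [stepA, symB, nextS, bOrder, fA, fC, fG, fT] <;> decide)

-- A's loop from a base state computes exactly B's pair-mapped output
lemma foldA_outB (cs : List Char) : ∀ (ans : List Char) (pre : String),
    (pre = "A" ∨ pre = "C" ∨ pre = "G" ∨ pre = "T") →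
    (List.foldl stepA (ans, pre) cs).1 = ans ++ (outB pre cs).flatMap String.toList := by
  induction cs with
  | nil => intro ans pre _; simp [outB]
  | cons c cs ih =>
    intro ans pre hp
    rw [List.foldl_cons, stepA_symB ans pre c hp]
    rw [ih _ _ (nextS_base pre c)]
    simp [outB]

-- ''.join: with the empty separator PySem's join is flatten
lemma join_empty_flatten (l : List (List Char)) : PySem.Chars.join [] l = l.flatten := by
  induction l with
  | nil => rfl
  | cons x xs ih =>
    cases xs with
    | nil => simp [PySem.Chars.join_singleton]
    | cons y ys => rw [PySem.Chars.join_cons_cons]; simp_all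

-- B on a base initial state is the recursive pair-mapped output, joined
lemma alt_eq_outB (text : String) (pre_N : String)
    (hb : pre_N = "A" ∨ pre_N = "C" ∨ pre_N = "G" ∨ pre_N = "T") :
    r_rotate_alt text pre_N = PySem.Str.join "" (outB pre_N text.toList) := by
  unfold r_rotate_alt
  rw [if_pos hb]
  show PySem.Str.join "" (((text.toList.foldl bStep [pre_N]).zip text.toList).map
    (fun p => symB p.1 p.2)) = _
  rw [foldl_bStep_scan _ _ (by simp)]
  have hl : ([pre_N].getLastD "") = pre_N := rfl
  rw [hl, List.singleton_append, zip_map_symB]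

-- ===== VERDICT (by name: the statement is the Claim_ definition above) =====
theorem r_rotate_spec : Claim_equal_r_rotate := by
  intro text pre_N _
  unfold Spec_r_rotate
  by_cases hb : pre_N = "A" ∨ pre_N = "C" ∨ pre_N = "G" ∨ pre_N = "T"
  · rw [alt_eq_outB _ _ hb]
    unfold r_rotate
    rw [foldA_outB _ _ _ hb]
    simp [PySem.Str.join, join_empty_flatten, List.flatMap_def]
  · unfold r_rotate r_rotate_alt
    rw [if_neg hb]
    push Not at hb
    rw [foldA_nonbase _ _ _ hb]
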